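-- pv_equiv track=rewrite | github.com/pernebay-arailym/Code_On_Time_MERITIS | checkdata.py | find_optimal_teams
-- ===== SOURCE A (Python) =====
-- import itertools
--
-- def relay_transmission_time(time1, time2):
--     return (time1 - time2) ** 2
--
-- def total_team_time(team, athlete_data):
--     total_time = 0
--     for i in range(len(team) - 1):
--         athlete1 = team[i]
--         athlete2 = team[i + 1]
--         total_time += athlete_data[athlete1]  # Add individual athlete time
--         total_time += relay_transmission_time(athlete_data[athlete1], athlete_data[athlete2])  # Add relay transmission time
--     total_time += athlete_data[team[-1]]  # Add last athlete's time
--     return total_time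
--
-- def find_optimal_teams(athlete_data):
--     athletes = list(athlete_data.keys())
--     best_score = float('-inf')
--     best_teams = []
--
--     # Generate all possible team combinations
--     for team_combination in itertools.combinations(athletes, 4):
--         remaining_athletes = [athlete for athlete in athletes if athlete not in team_combination]
--         team1_time = total_team_time(team_combination, athlete_data)
--         team2_time = total_team_time(remaining_athletes, athlete_data)
--         score = team1_time - team2_time
--         if score > best_score:
--             best_score = score
--             best_teams = [team_combination, remaining_athletes]
--
--     return best_teams
-- ===== SOURCE B (Python) =====
-- import itertools
--
-- def find_optimal_teams(athlete_data):
--     athletes = list(athlete_data.keys())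
--     n = len(athletes)
--     ts = [athlete_data[a] for a in athletes]
--     total = sum(ts)
--     # prefix sums of consecutive "relay" edge weights: pref[m] = sum_{p<m} (ts[p]-ts[p+1])**2
--     pref = [0]
--     for p in range(n - 1):
--         pref.append(pref[-1] + (ts[p] - ts[p + 1]) ** 2)
--     best_score = None
--     best_q = None
--     for q in itertools.combinations(range(n), 4):
--         i, j, k, l = q
--         t1 = (ts[i] + ts[j] + ts[k] + ts[l]
--               + (ts[i] - ts[j]) ** 2 + (ts[j] - ts[k]) ** 2 + (ts[k] - ts[l]) ** 2)
--         # complement chain time in O(1): kept elements form 5 contiguous segments;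
--         # internal edges come from pref, plus one bridge edge between adjacent
--         # non-empty segments.
--         t2 = total - ts[i] - ts[j] - ts[k] - ts[l]
--         prev = -1  # index of last kept element so far, -1 = none yet
--         a = 0
--         for x in (i, j, k, l, n):
--             if a < x:
--                 t2 += pref[x - 1] - pref[a]
--                 if prev >= 0:
--                     t2 += (ts[prev] - ts[a]) ** 2
--                 prev = x - 1
--             a = x + 1
--         score = t1 - t2
--         if best_score is None or score > best_score:
--             best_score = score
--             best_q = q
--     if best_q is None:
--         return []
--     team = tuple(athletes[x] for x in best_q)
--     rest = [athletes[x] for x in range(n) if x not in best_q]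
--     return [team, rest]
-- ===== Notes on version B (the rewrite author's own statement) =====
-- stated objective: faster
-- what changed: B precomputes prefix sums of the consecutive relay-edge weights and of the individual times once, then scores each 4-subset in O(1) by assembling the complement relay chain from at most five contiguous segments plus bridge edges, instead of rebuilding the complement list and re-walking both chains for every subset; only the single best index quadruple is materialised into name lists at the end.
import Mathlib
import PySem

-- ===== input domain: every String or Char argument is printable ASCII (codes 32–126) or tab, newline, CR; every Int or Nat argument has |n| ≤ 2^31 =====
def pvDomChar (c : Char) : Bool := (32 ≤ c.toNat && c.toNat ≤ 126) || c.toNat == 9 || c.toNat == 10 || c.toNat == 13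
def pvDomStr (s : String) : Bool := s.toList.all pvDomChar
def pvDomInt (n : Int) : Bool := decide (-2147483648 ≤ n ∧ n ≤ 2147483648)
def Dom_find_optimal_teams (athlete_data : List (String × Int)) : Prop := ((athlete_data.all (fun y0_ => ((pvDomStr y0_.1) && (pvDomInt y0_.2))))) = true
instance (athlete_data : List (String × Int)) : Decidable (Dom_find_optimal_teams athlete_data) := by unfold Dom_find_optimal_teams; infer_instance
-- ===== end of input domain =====

-- B scores each 4-subset in O(1) from precomputed prefix sums instead of rebuilding and
-- re-walking the complement relay chain per subset (objective: faster, O(n^4) vs O(n^5)).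

-- ===== PORT A =====
def relay_transmission_time (time1 time2 : Int) : Int := (time1 - time2) ^ 2

-- Dict lookups are ported with default 0: every looked-up key comes from the dict's own
-- keys, so Python's KeyError is unreachable.  Indexing the last element of an empty team
-- raises IndexError in Python; that is reachable only with exactly 4 keys, excluded by Pre_.
def total_team_time (team : List String) (athlete_data : PySem.Dict String Int) : Int :=
  let total_time := (PySem.List.pyRange 0 ((team.length : Int) - 1) 1).foldl
    (fun total_time i =>
      let athlete1 := PySem.List.pyGetD team i ""
      let athlete2 := PySem.List.pyGetD team (i + 1) ""
      total_time + PySem.Dict.getD athlete_data athlete1 0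
        + relay_transmission_time (PySem.Dict.getD athlete_data athlete1 0)
            (PySem.Dict.getD athlete_data athlete2 0)) 0
  total_time + PySem.Dict.getD athlete_data (PySem.List.pyGetD team (-1) "") 0

-- best_score starts at float('-inf'): modelled as Option Int none, every first score beats it.
def find_optimal_teams (athlete_data : List (String × Int)) : List (List String) :=
  let d := PySem.Dict.ofList athlete_data
  let athletes := PySem.Dict.keys d
  let st := (PySem.List.combinations athletes 4).foldl
    (fun (st : Option Int × List (List String)) team_combination =>
      let remaining_athletes := athletes.filter (fun athlete => !(team_combination.contains athlete))
      let team1_time := total_team_time team_combination d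
      let team2_time := total_team_time remaining_athletes d
      let score := team1_time - team2_time
      match st.1 with
      | none => (some score, [team_combination, remaining_athletes])
      | some best => if best < score then (some score, [team_combination, remaining_athletes]) else st)
    (none, [])
  st.2

-- ===== PORT B =====
def find_optimal_teams_alt (athlete_data : List (String × Int)) : List (List String) :=
  let d := PySem.Dict.ofList athlete_data
  let athletes := PySem.Dict.keys d
  let n : Int := (athletes.length : Int)
  let ts := athletes.map (fun a => PySem.Dict.getD d a 0)
  let total := ts.sum
  let pref := (PySem.List.pyRange 0 (n - 1) 1).foldl
    (fun pref p =>
      pref ++ [PySem.List.pyGetD pref (-1) 0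
        + (PySem.List.pyGetD ts p 0 - PySem.List.pyGetD ts (p + 1) 0) ^ 2]) [(0 : Int)]
  let st := (PySem.List.combinations (PySem.List.pyRange 0 n 1) 4).foldl
    (fun (st : Option Int × Option (List Int)) q =>
      match q with
      | [i, j, k, l] =>
        let tsg := fun (x : Int) => PySem.List.pyGetD ts x 0
        let t1 := tsg i + tsg j + tsg k + tsg l
          + (tsg i - tsg j) ^ 2 + (tsg j - tsg k) ^ 2 + (tsg k - tsg l) ^ 2
        -- prev = -1 is Python's "no kept element yet" sentinel
        let fin := [i, j, k, l, n].foldl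
          (fun (s : Int × Int × Int) x =>
            if s.2.2 < x then
              let t2 := s.1 + PySem.List.pyGetD pref (x - 1) 0 - PySem.List.pyGetD pref s.2.2 0
              let t2 := if 0 ≤ s.2.1 then t2 + (tsg s.2.1 - tsg s.2.2) ^ 2 else t2
              (t2, x - 1, x + 1)
            else (s.1, s.2.1, x + 1))
          (total - tsg i - tsg j - tsg k - tsg l, -1, 0)
        let score := t1 - fin.1
        match st.1 with
        | none => (some score, some q)
        | some best => if best < score then (some score, some q) else st
      | _ => st)  -- unreachable: combinations with r = 4 yields length-4 lists only
    (none, none)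
  match st.2 with
  | none => []
  | some q =>
    let team := q.map (fun x => PySem.List.pyGetD athletes x "")
    let rest := ((PySem.List.pyRange 0 n 1).filter (fun x => !(q.contains x))).map
      (fun x => PySem.List.pyGetD athletes x "")
    [team, rest]

-- ===== PRECONDITION & SPEC =====
-- With exactly 4 distinct keys the complement team is empty and A's total_team_time
-- indexes the last element of an empty list: Python raises IndexError.  Pre_ excludes exactly that.
def Pre_find_optimal_teams (athlete_data : List (String × Int)) : Prop :=
  (PySem.Dict.keys (PySem.Dict.ofList athlete_data)).length ≠ 4
instance (athlete_data : List (String × Int)) : Decidable (Pre_find_optimal_teams athlete_data) := by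
  unfold Pre_find_optimal_teams; infer_instance

def pvWitness_find_optimal_teams : (List (String × Int)) :=
  [("a", 1), ("b", 2), ("c", 3), ("d", 4), ("e", 5)]

def Spec_find_optimal_teams (athlete_data : List (String × Int)) (out : List (List String)) : Prop := out = find_optimal_teams_alt athlete_data
instance (athlete_data : List (String × Int)) (out : List (List String)) : Decidable (Spec_find_optimal_teams athlete_data out) := by unfold Spec_find_optimal_teams; infer_instance

-- ===== CLAIM (what is proved, stated in full; the proofs are below) =====
def Claim_equal_find_optimal_teams : Prop := ∀ (athlete_data : List (String × Int)), Dom_find_optimal_teams athlete_data → Pre_find_optimal_teams athlete_data → Spec_find_optimal_teams athlete_data (find_optimal_teams athlete_data)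

-- ===== LEMMAS AND PROOFS =====

-- Abbreviations used only by the proofs (values of ts at a Nat position; chain edge sum).
def pvTs (ts : List Int) (p : Nat) : Int := ts.getD p 0

def pvChainE : List Int → Int
  | a :: b :: rest => (a - b) ^ 2 + pvChainE (b :: rest)
  | _ => 0

@[simp] lemma pvChainE_nil : pvChainE [] = 0 := rfl
@[simp] lemma pvChainE_singleton (a : Int) : pvChainE [a] = 0 := rfl
@[simp] lemma pvChainE_cons₂ (a b : Int) (r : List Int) :
    pvChainE (a :: b :: r) = (a - b) ^ 2 + pvChainE (b :: r) := rfl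

/-- Values of `ts` on the index segment `[a, b)`. -/
def pvSeg (ts : List Int) (a b : Nat) : List Int := (List.range' a (b - a)).map (pvTs ts)

/-- Kept indices of `[a, n)` after removing the sorted indices `rs`. -/
def pvIkept (n : Nat) : Nat → List Nat → List Nat
  | a, [] => List.range' a (n - a)
  | a, x :: rs => List.range' a (x - a) ++ pvIkept n (x + 1) rs

/-- Kept values: `ts` on the kept indices. -/
def pvKept (ts : List Int) : Nat → List Nat → List Int
  | a, [] => pvSeg ts a ts.length
  | a, x :: rs => pvSeg ts a x ++ pvKept ts (x + 1) rs

/-- Spec of B's prefix array entry `pref[m]`. -/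
def pvPrefV (ts : List Int) (m : Nat) : Int := pvChainE (pvSeg ts 0 (m + 1))

/-- Prefix sums of the values themselves. -/
def pvS (ts : List Int) (m : Nat) : Int := (pvSeg ts 0 m).sum

/-- A's relay loop, on the value list. -/
def pvLoop (vs : List Int) : Int :=
  (PySem.List.pyRange 0 ((vs.length : Int) - 1) 1).foldl
    (fun acc i => acc + PySem.List.pyGetD vs i 0
      + (PySem.List.pyGetD vs i 0 - PySem.List.pyGetD vs (i + 1) 0) ^ 2) 0

lemma pvGetD_append_left {α : Type} (xs ys : List α) (d : α) (i : Int)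
    (h0 : 0 ≤ i) (h1 : i < (xs.length : Int)) :
    PySem.List.pyGetD (xs ++ ys) i d = PySem.List.pyGetD xs i d := by
  rw [PySem.List.pyGetD_eq_getElem _ d h0 (by simp; omega),
      PySem.List.pyGetD_eq_getElem _ d h0 h1]
  exact List.getElem_append_left (by omega)

lemma pvMapRangeGetD {α : Type} (l : List α) (d : α) :
    (List.range l.length).map (fun p => l.getD p d) = l := by
  apply List.ext_getElem (by simp)
  intro i h1 h2
  simp [List.getD_eq_getElem?_getD, List.getElem?_eq_getElem h2]

lemma pvChainE_append (L M : List Int) :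
    pvChainE (L ++ M) = pvChainE L + pvChainE M +
      (if L ≠ [] ∧ M ≠ [] then (L.getLast?.getD 0 - M.head?.getD 0) ^ 2 else 0) := by
  induction L with
  | nil => simp
  | cons x L ih =>
    cases L with
    | nil =>
      cases M with
      | nil => simp
      | cons y M => simp; ring
    | cons y L' =>
      simp only [List.cons_append, pvChainE_cons₂] at *
      rw [ih]
      by_cases hM : M = [] <;> simp [hM] <;> ring

lemma pvSeg_eq_nil (ts : List Int) {a b : Nat} (h : b ≤ a) : pvSeg ts a b = [] := by
  simp [pvSeg, Nat.sub_eq_zero_of_le h]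

lemma pvSeg_ne_nil (ts : List Int) {a b : Nat} (h : a < b) : pvSeg ts a b ≠ [] := by
  simp only [pvSeg, ne_eq, List.map_eq_nil_iff, List.range'_eq_nil_iff]
  omega

lemma pvSeg_concat (ts : List Int) {a b : Nat} (h : a ≤ b) :
    pvSeg ts a (b + 1) = pvSeg ts a b ++ [pvTs ts b] := by
  have h1 : b + 1 - a = (b - a) + 1 := by omega
  have h2 : a + (b - a) = b := by omega
  simp [pvSeg, h1, List.range'_1_concat, h2]

lemma pvSeg_headD (ts : List Int) {a b : Nat} (h : a < b) :
    (pvSeg ts a b).head?.getD 0 = pvTs ts a := by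
  obtain ⟨c, hc⟩ : ∃ c, b - a = c + 1 := ⟨b - a - 1, by omega⟩
  rw [pvSeg, hc, List.range'_succ]
  simp

lemma pvSeg_getLastD (ts : List Int) {a b : Nat} (h : a < b) :
    (pvSeg ts a b).getLast?.getD 0 = pvTs ts (b - 1) := by
  have h1 : b = (b - 1) + 1 := by omega
  rw [h1, pvSeg_concat ts (by omega)]
  simp

lemma pvPrefV_succ (ts : List Int) (b : Nat) :
    pvPrefV ts (b + 1) = pvPrefV ts b + (pvTs ts b - pvTs ts (b + 1)) ^ 2 := by
  unfold pvPrefV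
  rw [pvSeg_concat ts (by omega), pvChainE_append]
  have h1 : pvSeg ts 0 (b + 1) ≠ [] := pvSeg_ne_nil ts (by omega)
  have h2 := pvSeg_getLastD ts (show 0 < b + 1 by omega)
  simp only [Nat.add_sub_cancel] at h2
  simp [h1, h2]

lemma pvChainE_seg (ts : List Int) {a b : Nat} (h : a < b) :
    pvChainE (pvSeg ts a b) = pvPrefV ts (b - 1) - pvPrefV ts a := by
  induction b with
  | zero => omega
  | succ b ih =>
    rcases Nat.lt_or_ge a b with hb | hb
    · rw [pvSeg_concat ts (by omega), pvChainE_append, ih hb]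
      have hs := pvPrefV_succ ts (b - 1)
      rw [show b - 1 + 1 = b by omega] at hs
      simp only [pvSeg_ne_nil ts hb, pvSeg_getLastD ts hb, Nat.add_sub_cancel, ne_eq,
        not_false_eq_true, and_self, if_true, List.cons_ne_self, hs]
      simp
      ring
    · have hab : a = b := by omega
      subst hab
      rw [pvSeg_concat ts (le_refl a)]
      simp [pvSeg_eq_nil ts (le_refl a)]

lemma pvS_succ (ts : List Int) (m : Nat) : pvS ts (m + 1) = pvS ts m + pvTs ts m := by
  unfold pvS
  rw [pvSeg_concat ts (by omega)]
  simp

lemma pvSeg_sum (ts : List Int) {a b : Nat} (h : a ≤ b) :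
    (pvSeg ts a b).sum = pvS ts b - pvS ts a := by
  induction b with
  | zero =>
    have : a = 0 := by omega
    subst this; simp [pvSeg_eq_nil ts (le_refl 0)]
  | succ b ih =>
    rcases Nat.lt_or_ge a (b + 1) with hb | hb
    · have hab : a ≤ b := by omega
      rw [pvSeg_concat ts hab, pvS_succ]
      simp [ih hab]
      ring
    · simp [pvSeg_eq_nil ts hb]
      have : a = b + 1 := by omega
      simp [this]

lemma pvSeg_self (ts : List Int) : pvSeg ts 0 ts.length = ts := by
  simp only [pvSeg, Nat.sub_zero, ← List.range_eq_range']
  exact pvMapRangeGetD ts 0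

lemma pvSum_eq (ts : List Int) : ts.sum = pvS ts ts.length := by
  rw [pvS, pvSeg_self]

lemma pvKept_eq_map (ts : List Int) : ∀ (rs : List Nat) (a : Nat),
    pvKept ts a rs = (pvIkept ts.length a rs).map (pvTs ts) := by
  intro rs
  induction rs with
  | nil => intro a; simp [pvKept, pvIkept, pvSeg]
  | cons x rs ih => intro a; simp [pvKept, pvIkept, pvSeg, ih]

lemma pvIkept_mem_lt (n : Nat) : ∀ (rs : List Nat) (a : Nat) (p : Nat),
    (∀ x ∈ rs, x < n) → p ∈ pvIkept n a rs → p < n := by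
  intro rs
  induction rs with
  | nil =>
    intro a p _ hp
    simp [pvIkept, List.mem_range'_1] at hp
    omega
  | cons x rs ih =>
    intro a p hb hp
    simp only [pvIkept, List.mem_append] at hp
    rcases hp with hp | hp
    · simp [List.mem_range'_1] at hp
      have := hb x (by simp)
      omega
    · exact ih _ _ (fun y hy => hb y (by simp [hy])) hp

lemma pvSortedLen : ∀ (rs : List Nat) (a n : Nat), List.Pairwise (· < ·) rs →
    (∀ x ∈ rs, a ≤ x) → (∀ x ∈ rs, x < n) → rs.length ≤ n - a := by
  intro rs
  induction rs with
  | nil => intro a n _ _ _; simp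
  | cons x rs ih =>
    intro a n hs hge hlt
    rw [List.pairwise_cons] at hs
    have := ih (x + 1) n hs.2 (fun y hy => hs.1 y hy) (fun y hy => hlt y (by simp [hy]))
    have hx : x < n := hlt x (by simp)
    have hax : a ≤ x := hge x (by simp)
    simp only [List.length_cons]
    omega

lemma pvKept_length (ts : List Int) : ∀ (rs : List Nat) (a : Nat),
    List.Pairwise (· < ·) rs → (∀ x ∈ rs, a ≤ x) → (∀ x ∈ rs, x < ts.length) →
    a ≤ ts.length → (pvKept ts a rs).length = ts.length - a - rs.length := by
  intro rs
  induction rs with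
  | nil =>
    intro a _ _ _ ha
    simp [pvKept, pvSeg]
  | cons x rs ih =>
    intro a hs hge hlt ha
    have hx : x < ts.length := hlt x (by simp)
    have hax : a ≤ x := hge x (by simp)
    rw [List.pairwise_cons] at hs
    have hfit := pvSortedLen rs (x + 1) ts.length hs.2 (fun y hy => hs.1 y hy)
      (fun y hy => hlt y (by simp [hy]))
    have hrec := ih (x + 1) hs.2 (fun y hy => hs.1 y hy)
      (fun y hy => hlt y (by simp [hy])) (by omega)
    simp only [pvKept, List.length_append, hrec, pvSeg, List.length_map, List.length_range',
      List.length_cons]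
    omega

lemma pvKept_sum (ts : List Int) : ∀ (rs : List Nat) (a : Nat),
    List.Pairwise (· < ·) rs → (∀ x ∈ rs, a ≤ x) → (∀ x ∈ rs, x < ts.length) →
    a ≤ ts.length →
    (pvKept ts a rs).sum = pvS ts ts.length - pvS ts a - (rs.map (pvTs ts)).sum := by
  intro rs
  induction rs with
  | nil =>
    intro a _ _ _ ha
    simp [pvKept, pvSeg_sum ts ha]
  | cons x rs ih =>
    intro a hs hge hlt ha
    rw [List.pairwise_cons] at hs
    have hx : x < ts.length := hlt x (by simp)
    have hax : a ≤ x := hge x (by simp)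
    have hrec := ih (x + 1) hs.2 (fun y hy => hs.1 y hy)
      (fun y hy => hlt y (by simp [hy])) (by omega)
    simp only [pvKept, List.sum_append, hrec, pvSeg_sum ts hax, List.map_cons, List.sum_cons]
    have := pvS_succ ts x
    omega

lemma pvRangeFilter (n : Nat) : ∀ (rs : List Nat) (a : Nat),
    List.Pairwise (· < ·) rs → (∀ x ∈ rs, a ≤ x) → (∀ x ∈ rs, x < n) →
    (List.range' a (n - a)).filter (fun y => !(rs.contains y)) = pvIkept n a rs := by
  intro rs
  induction rs with
  | nil =>
    intro a _ _ _
    simp [pvIkept]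
  | cons x rs ih =>
    intro a hs hge hlt
    rw [List.pairwise_cons] at hs
    have hx : x < n := hlt x (by simp)
    have hax : a ≤ x := hge x (by simp)
    have hsplit : List.range' a (n - a) = List.range' a (x - a) ++ x :: List.range' (x + 1) (n - (x + 1)) := by
      have h1 : n - a = (x - a) + (n - x) := by omega
      have h2 : a + 1 * (x - a) = x := by omega
      have h3 : n - x = (n - (x + 1)) + 1 := by omega
      rw [h1, ← List.range'_append, h2, h3, List.range'_succ]
    rw [hsplit, List.filter_append]
    have hl : (List.range' a (x - a)).filter (fun y => !((x :: rs).contains y)) = List.range' a (x - a) := by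
      apply List.filter_eq_self.mpr
      intro y hy
      rw [List.mem_range'_1] at hy
      simp only [List.contains_cons, Bool.not_or, Bool.and_eq_true, Bool.not_eq_true']
      constructor
      · simp; omega
      · rw [← Bool.not_eq_true, List.contains_iff_exists_mem_beq]
        simp only [beq_iff_eq, not_exists, not_and]
        intro z hz
        have := hs.1 z hz
        omega
    have hr : (x :: List.range' (x + 1) (n - (x + 1))).filter (fun y => !((x :: rs).contains y))
        = (List.range' (x + 1) (n - (x + 1))).filter (fun y => !(rs.contains y)) := by
      rw [List.filter_cons]
      simp only [List.contains_cons, beq_self_eq_true, Bool.true_or, Bool.not_true,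
        Bool.false_eq_true, if_false]
      apply List.filter_congr
      intro y hy
      rw [List.mem_range'_1] at hy
      simp only [List.contains_cons, Bool.not_or]
      have : (y == x) = false := by simp; omega
      simp [this]
    rw [hl, hr, ih (x + 1) hs.2 (fun y hy => hs.1 y hy) (fun y hy => hlt y (by simp [hy]))]
    rfl

/-- Characterisation of B's prefix-sum array. -/
lemma pvPref_eq (ts : List Int) (h : 1 ≤ ts.length) :
    (PySem.List.pyRange 0 ((ts.length : Int) - 1) 1).foldl
      (fun pref p => pref ++ [PySem.List.pyGetD pref (-1) 0
        + (PySem.List.pyGetD ts p 0 - PySem.List.pyGetD ts (p + 1) 0) ^ 2]) [(0 : Int)]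
    = (List.range ts.length).map (pvPrefV ts) := by
  have key : ∀ c : Nat,
      (PySem.List.pyRange 0 (c : Int) 1).foldl
        (fun pref p => pref ++ [PySem.List.pyGetD pref (-1) 0
          + (PySem.List.pyGetD ts p 0 - PySem.List.pyGetD ts (p + 1) 0) ^ 2]) [(0 : Int)]
      = (List.range (c + 1)).map (pvPrefV ts) := by
    intro c
    induction c with
    | zero =>
      rw [PySem.List.pyRange_one_eq_nil (by omega)]
      simp [pvPrefV, pvSeg, List.range'_succ, pvTs]
    | succ c ih =>
      have hstep : ((c : Nat) : Int) + 1 = ((c + 1 : Nat) : Int) := by push_cast; ring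
      rw [← hstep, PySem.List.pyRange_one_succ_right (by positivity), List.foldl_append, ih]
      simp only [List.foldl_cons, List.foldl_nil]
      have hne : (List.range (c + 1)).map (pvPrefV ts) ≠ [] := by simp
      rw [PySem.List.pyGetD_neg_one _ _ hne]
      have hlast : ((List.range (c + 1)).map (pvPrefV ts)).getLast hne = pvPrefV ts c := by
        rw [List.getLast_eq_getElem]
        simp
      rw [hlast, PySem.List.pyGetD_natCast, hstep, PySem.List.pyGetD_natCast]
      rw [List.range_succ (n := c + 1), List.map_append]
      congr 1
      simp only [List.map_cons, List.map_nil, List.cons.injEq, and_true]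
      rw [pvPrefV_succ]
      rfl
  have h1 : (ts.length : Int) - 1 = ((ts.length - 1 : Nat) : Int) := by omega
  rw [h1, key (ts.length - 1), show ts.length - 1 + 1 = ts.length by omega]

/-- Invariant of B's five-step complement-assembly fold. -/
lemma pvFoldB (ts : List Int) (prefL : List Int)
    (hpref : ∀ m : Nat, m < ts.length → PySem.List.pyGetD prefL (m : Int) 0 = pvPrefV ts m) :
    ∀ (rs : List Nat) (a : Nat) (t2 prev : Int),
    List.Pairwise (· < ·) rs → (∀ x ∈ rs, a ≤ x) → (∀ x ∈ rs, x < ts.length) →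
    a ≤ ts.length →
    (prev = -1 ∨ ∃ pn : Nat, prev = (pn : Int) ∧ pn < a ∧ pn < ts.length) →
    (((rs ++ [ts.length]).map (fun x : Nat => (x : Int))).foldl
      (fun (s : Int × Int × Int) x =>
        if s.2.2 < x then
          let t2 := s.1 + PySem.List.pyGetD prefL (x - 1) 0 - PySem.List.pyGetD prefL s.2.2 0
          let t2 := if 0 ≤ s.2.1
            then t2 + (PySem.List.pyGetD ts s.2.1 0 - PySem.List.pyGetD ts s.2.2 0) ^ 2 else t2
          (t2, x - 1, x + 1)
        else (s.1, s.2.1, x + 1))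
      (t2, prev, (a : Int))).1
    = t2 + pvChainE (pvKept ts a rs)
      + (if 0 ≤ prev ∧ pvKept ts a rs ≠ []
          then (pvTs ts prev.toNat - (pvKept ts a rs).head?.getD 0) ^ 2 else 0) := by
  intro rs
  induction rs with
  | nil =>
    intro a t2 prev _ _ _ ha hprev
    simp only [List.nil_append, List.map_cons, List.map_nil, List.foldl_cons, List.foldl_nil]
    by_cases hc : (a : Int) < (ts.length : Int)
    · have han : a < ts.length := by exact_mod_cast hc
      rw [if_pos hc]
      have e1 : ((ts.length : Nat) : Int) - 1 = ((ts.length - 1 : Nat) : Int) := by omega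
      rw [e1, hpref (ts.length - 1) (by omega), hpref a han]
      have hK : pvKept ts a [] = pvSeg ts a ts.length := rfl
      rw [hK, pvChainE_seg ts han, pvSeg_headD ts han]
      have hKne : pvSeg ts a ts.length ≠ [] := pvSeg_ne_nil ts han
      rcases hprev with hp | ⟨pn, hp, hpa, hpn⟩
      · subst hp
        norm_num
        ring
      · subst hp
        simp only [PySem.List.pyGetD_natCast, Int.toNat_natCast, hKne, ne_eq,
          not_false_eq_true, and_true, Int.natCast_nonneg, if_true]
        unfold pvTs
        ring
    · rw [if_neg hc]
      have hK : pvKept ts a [] = pvSeg ts a ts.length := rfl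
      simp [hK, pvSeg_eq_nil ts (by omega : ts.length ≤ a)]
  | cons x rs' ih =>
    intro a t2 prev hs hge hlt ha hprev
    rw [List.pairwise_cons] at hs
    have hx : x < ts.length := hlt x (by simp)
    have hax : a ≤ x := hge x (by simp)
    have hK : pvKept ts a (x :: rs') = pvSeg ts a x ++ pvKept ts (x + 1) rs' := rfl
    simp only [List.cons_append, List.map_cons, List.foldl_cons]
    rcases Nat.lt_or_ge a x with hax' | hax'
    · -- a < x : take the segment [a, x)
      rw [if_pos (by exact_mod_cast hax')]
      have e1 : ((x : Nat) : Int) - 1 = ((x - 1 : Nat) : Int) := by omega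
      have e2 : ((x : Nat) : Int) + 1 = ((x + 1 : Nat) : Int) := by push_cast; ring
      rw [e1, e2, hpref (x - 1) (by omega), hpref a (by omega)]
      have hrec := ih (x + 1)
        (if 0 ≤ prev
          then t2 + pvPrefV ts (x - 1) - pvPrefV ts a
            + (PySem.List.pyGetD ts prev 0 - PySem.List.pyGetD ts ((a : Nat) : Int) 0) ^ 2
          else t2 + pvPrefV ts (x - 1) - pvPrefV ts a)
        ((x - 1 : Nat) : Int) hs.2 (fun y hy => hs.1 y hy)
        (fun y hy => hlt y (by simp [hy])) (by omega)
        (Or.inr ⟨x - 1, rfl, by omega, by omega⟩)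
      have hsegne : pvSeg ts a x ≠ [] := pvSeg_ne_nil ts hax'
      have happne : pvSeg ts a x ++ pvKept ts (x + 1) rs' ≠ [] :=
        List.append_ne_nil_of_left_ne_nil hsegne _
      obtain ⟨hd, tl, hseg⟩ := List.exists_cons_of_ne_nil hsegne
      have hhead : hd = pvTs ts a := by
        have := pvSeg_headD ts hax'
        rw [hseg] at this
        simpa using this
      have hheadApp : (pvSeg ts a x ++ pvKept ts (x + 1) rs').head?.getD 0 = pvTs ts a := by
        rw [hseg, List.cons_append, List.head?_cons, Option.getD_some, hhead]
      rw [hrec, hK, pvChainE_append, pvChainE_seg ts hax', pvSeg_getLastD ts hax', hheadApp]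
      by_cases hpnn : (0 : Int) ≤ prev
      · rw [if_pos hpnn]
        rcases hprev with hp | ⟨pn, hp, hpa, hpn⟩
        · subst hp; norm_num at hpnn
        · subst hp
          simp only [PySem.List.pyGetD_natCast, Int.toNat_natCast, hsegne, happne, ne_eq,
            not_false_eq_true, and_true, true_and, Int.natCast_nonneg, if_true]
          by_cases hK' : pvKept ts (x + 1) rs' = [] <;>
            simp only [hK', ne_eq, not_true_eq_false, not_false_eq_true, and_true, and_false,
              if_true, if_false, ite_true, ite_false] <;>
          · unfold pvTs
            ring
      · rw [if_neg hpnn]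
        simp only [Int.toNat_natCast, hsegne, happne, hpnn, ne_eq, not_false_eq_true, and_true,
          true_and, false_and, Int.natCast_nonneg, if_true, if_false, ite_false]
        by_cases hK' : pvKept ts (x + 1) rs' = [] <;>
          simp only [hK', ne_eq, not_true_eq_false, not_false_eq_true, and_true, and_false,
            if_true, if_false, ite_true, ite_false] <;> ring
    · -- a = x : empty segment, skip
      have hax2 : a = x := by omega
      subst hax2
      rw [if_neg (by omega)]
      have e2 : ((a : Nat) : Int) + 1 = ((a + 1 : Nat) : Int) := by push_cast; ring
      rw [e2]
      have hrec := ih (a + 1) t2 prev hs.2 (fun y hy => hs.1 y hy)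
        (fun y hy => hlt y (by simp [hy])) (by omega)
        (by
          rcases hprev with hp | ⟨pn, hp, hpa, hpn⟩
          · exact Or.inl hp
          · exact Or.inr ⟨pn, hp, by omega, hpn⟩)
      rw [hrec, hK, pvSeg_eq_nil ts (le_refl a), List.nil_append]

lemma pvLoop_concat (vs : List Int) (z : Int) :
    pvLoop (vs ++ [z]) = pvLoop vs +
      (if vs = [] then 0 else vs.getLast?.getD 0 + (vs.getLast?.getD 0 - z) ^ 2) := by
  by_cases hvs : vs = []
  · subst hvs
    simp only [List.nil_append, if_true, pvLoop, List.length_cons, List.length_nil]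
    rw [PySem.List.pyRange_one_eq_nil (by omega), PySem.List.pyRange_one_eq_nil (by omega)]
    simp
  · have hL : 1 ≤ vs.length := List.length_pos_iff.mpr hvs
    rw [if_neg hvs]
    unfold pvLoop
    have e0 : ((vs ++ [z]).length : Int) - 1 = (vs.length : Int) := by simp
    have hsplit : PySem.List.pyRange 0 (vs.length : Int) 1
        = PySem.List.pyRange 0 ((vs.length : Int) - 1) 1 ++ [(vs.length : Int) - 1] := by
      have hh := PySem.List.pyRange_one_succ_right (a := 0) (b := (vs.length : Int) - 1) (by omega)
      rw [show ((vs.length : Int) - 1) + 1 = (vs.length : Int) by ring] at hh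
      exact hh
    rw [e0, hsplit, List.foldl_append]
    have hcongr : ∀ (acc : Int), ∀ i ∈ PySem.List.pyRange 0 ((vs.length : Int) - 1) 1,
        (acc + PySem.List.pyGetD (vs ++ [z]) i 0
          + (PySem.List.pyGetD (vs ++ [z]) i 0 - PySem.List.pyGetD (vs ++ [z]) (i + 1) 0) ^ 2)
        = (acc + PySem.List.pyGetD vs i 0
          + (PySem.List.pyGetD vs i 0 - PySem.List.pyGetD vs (i + 1) 0) ^ 2) := by
      intro acc i hi
      rw [PySem.List.mem_pyRange_one] at hi
      rw [pvGetD_append_left vs [z] 0 i hi.1 (by omega),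
        pvGetD_append_left vs [z] 0 (i + 1) (by omega) (by omega)]
    rw [PySem.List.foldl_congr_mem _ _ _ _ hcongr]
    simp only [List.foldl_cons, List.foldl_nil]
    have e2 : (vs.length : Int) - 1 = ((vs.length - 1 : Nat) : Int) := by omega
    have e3 : ((vs.length - 1 : Nat) : Int) + 1 = ((vs.length : Nat) : Int) := by omega
    rw [e2, e3, PySem.List.pyGetD_natCast, PySem.List.pyGetD_natCast]
    have h4 : (vs ++ [z]).getD (vs.length - 1) 0 = vs.getLast?.getD 0 := by
      rw [List.getD_append _ _ _ _ (by omega), List.getD_eq_getElem?_getD,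
        List.getLast?_eq_getElem?]
    have h5 : (vs ++ [z]).getD vs.length 0 = z := by
      simp [List.getD_eq_getElem?_getD]
    rw [h4, h5]
    ring

lemma pvLoop_eq (vs : List Int) (h : vs ≠ []) :
    pvLoop vs + vs.getLast?.getD 0 = vs.sum + pvChainE vs := by
  induction vs using List.reverseRecOn with
  | nil => exact absurd rfl h
  | append_singleton vs' z ih =>
    rw [pvLoop_concat]
    by_cases hvs : vs' = []
    · subst hvs
      simp only [List.nil_append, if_true, pvLoop, List.length_cons, List.length_nil]
      rw [PySem.List.pyRange_one_eq_nil (by omega)]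
      simp
    · rw [if_neg hvs, List.getLast?_concat]
      have hih := ih hvs
      rw [pvChainE_append, List.sum_append]
      simp only [hvs, ne_eq, not_false_eq_true, and_true, true_and, List.cons_ne_nil,
        if_true, pvChainE_singleton, List.head?_cons, Option.getD_some, List.sum_cons,
        List.sum_nil, Option.getD_some]
      linarith

/-- A's `total_team_time` on a nonempty team computes the chain time of the value list. -/
lemma pvTotal_eq (team : List String) (d : PySem.Dict String Int) (h : team ≠ []) :
    total_team_time team d
      = (team.map (fun s => PySem.Dict.getD d s 0)).sum
        + pvChainE (team.map (fun s => PySem.Dict.getD d s 0)) := by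
  set vs := team.map (fun s => PySem.Dict.getD d s 0) with hvs
  have hlen : vs.length = team.length := by simp [hvs]
  have hL : 1 ≤ team.length := List.length_pos_iff.mpr h
  unfold total_team_time
  have hcongr : ∀ (acc : Int), ∀ i ∈ PySem.List.pyRange 0 ((team.length : Int) - 1) 1,
      (acc + PySem.Dict.getD d (PySem.List.pyGetD team i "") 0
        + relay_transmission_time (PySem.Dict.getD d (PySem.List.pyGetD team i "") 0)
            (PySem.Dict.getD d (PySem.List.pyGetD team (i + 1) "") 0))
      = (acc + PySem.List.pyGetD vs i 0
        + (PySem.List.pyGetD vs i 0 - PySem.List.pyGetD vs (i + 1) 0) ^ 2) := by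
    intro acc i hi
    rw [PySem.List.mem_pyRange_one] at hi
    have g1 : PySem.Dict.getD d (PySem.List.pyGetD team i "") 0 = PySem.List.pyGetD vs i 0 := by
      rw [PySem.List.pyGetD_eq_getElem team "" hi.1 (by omega),
        PySem.List.pyGetD_eq_getElem vs 0 hi.1 (by omega)]
      simp [hvs]
    have g2 : PySem.Dict.getD d (PySem.List.pyGetD team (i + 1) "") 0
        = PySem.List.pyGetD vs (i + 1) 0 := by
      rw [PySem.List.pyGetD_eq_getElem team "" (by omega) (by omega),
        PySem.List.pyGetD_eq_getElem vs 0 (by omega) (by omega)]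
      simp [hvs]
    rw [g1, g2, relay_transmission_time]
  rw [PySem.List.foldl_congr_mem _ _ _ _ hcongr]
  have hlast : PySem.Dict.getD d (PySem.List.pyGetD team (-1) "") 0 = vs.getLast?.getD 0 := by
    rw [PySem.List.pyGetD_neg_one team "" h]
    simp [hvs, List.getLast?_map, List.getLast?_eq_some_getLast h]
  rw [hlast]
  have : (team.length : Int) = (vs.length : Int) := by rw [hlen]
  rw [this]
  exact pvLoop_eq vs (by simp [hvs, h])


/-- A's name-level filter of the complement is exactly the kept index positions. -/
lemma pvFilterRemove (as : List String) (hnd : as.Nodup) (i j k l : Nat)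
    (hp : ([i, j, k, l] : List Nat).Pairwise (· < ·))
    (hmem : ∀ x ∈ ([i, j, k, l] : List Nat), x < as.length) :
    List.filter (fun s =>
        !(([as.getD i "", as.getD j "", as.getD k "", as.getD l ""] : List String).contains s)) as
      = (pvIkept as.length 0 [i, j, k, l]).map (fun p => as.getD p "") := by
  set prd : String → Bool := fun s =>
    !(([as.getD i "", as.getD j "", as.getD k "", as.getD l ""] : List String).contains s) with hprd
  conv_lhs => rw [(pvMapRangeGetD as "").symm]
  rw [List.filter_map]
  have hpc : ∀ y ∈ List.range as.length,
      (prd ∘ (fun p => as.getD p "")) y = (fun y => !(([i, j, k, l] : List Nat).contains y)) y := by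
    intro y hy
    rw [List.mem_range] at hy
    have hinj : ∀ z : Nat, z < as.length → ((as.getD y "" = as.getD z "") ↔ y = z) := by
      intro z hz
      constructor
      · intro he
        rw [List.getD_eq_getElem as "" hy, List.getD_eq_getElem as "" hz] at he
        exact (List.Nodup.getElem_inj_iff hnd).mp he
      · intro he; rw [he]
    simp only [hprd, Function.comp_apply, List.contains_eq_mem, List.mem_cons,
      List.not_mem_nil, or_false]
    congr 1
    rw [decide_eq_decide]
    rw [hinj i (hmem i (by simp)), hinj j (hmem j (by simp)), hinj k (hmem k (by simp)),
      hinj l (hmem l (by simp))]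
  rw [List.filter_congr hpc]
  have hr := pvRangeFilter as.length [i, j, k, l] 0 hp (by simp) hmem
  simp only [Nat.sub_zero] at hr
  rw [← List.range_eq_range'] at hr
  rw [hr]

/-- Folding two related loop bodies from related states keeps the states related. -/
lemma pvFoldRel {σA σB γ : Type} (F : σB → σA) (bA : σA → γ → σA) (bB : σB → γ → σB)
    (P : γ → Prop) :
    ∀ (cs : List γ) (sa : σA) (sb : σB), (∀ c ∈ cs, P c) →
    (∀ s c, P c → bA (F s) c = F (bB s c)) → sa = F sb →
    cs.foldl bA sa = F (cs.foldl bB sb) := by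
  intro cs
  induction cs with
  | nil => intro sa sb _ _ h; simpa using h
  | cons c cs ih =>
    intro sa sb hP hstep h
    subst h
    simp only [List.foldl_cons]
    exact ih _ _ (fun x hx => hP x (by simp [hx])) hstep (hstep sb c (hP c (by simp)))

-- ===== VERDICT (by name: the statement is the Claim_ definition above) =====
theorem find_optimal_teams_spec : Claim_equal_find_optimal_teams := by
  intro ad _ hpre
  unfold Spec_find_optimal_teams
  unfold Pre_find_optimal_teams at hpre
  have hnd : (PySem.Dict.ofList ad).keys.Nodup := PySem.Dict.nodup_keys_ofList ad
  simp only [find_optimal_teams, find_optimal_teams_alt]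
  generalize hg : PySem.Dict.ofList ad = d at hpre hnd ⊢
  set as := d.keys with has
  set n := as.length with hn
  set ts := as.map (fun a => PySem.Dict.getD d a 0) with hts
  have hts_len : ts.length = n := by rw [hts, hn]; simp
  have hAsEq : as = (List.range n).map (fun p => as.getD p "") := by
    rw [hn]; exact (pvMapRangeGetD as "").symm
  have hcombA : PySem.List.combinations as 4
      = (PySem.List.combinations (List.range n) 4).map (List.map (fun p => as.getD p "")) := by
    conv_lhs => rw [hAsEq]
    rw [PySem.List.combinations_map]
  have hpyr : PySem.List.pyRange 0 (n : Int) 1 = (List.range n).map (fun p : Nat => (p : Int)) := by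
    rw [PySem.List.pyRange_one]
    simp
  have hcombB : PySem.List.combinations (PySem.List.pyRange 0 (n : Int) 1) 4
      = (PySem.List.combinations (List.range n) 4).map (List.map (fun p : Nat => (p : Int))) := by
    rw [hpyr, PySem.List.combinations_map]
  rw [hcombA, hcombB, List.foldl_map, List.foldl_map]
  set prefE := (PySem.List.pyRange 0 ((n : Int) - 1) 1).foldl
    (fun pref p => pref ++ [PySem.List.pyGetD pref (-1) 0
      + (PySem.List.pyGetD ts p 0 - PySem.List.pyGetD ts (p + 1) 0) ^ 2]) [(0 : Int)] with hprefE
  set F : Option Int × Option (List Int) → Option Int × List (List String) := fun sb =>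
    (sb.1, match sb.2 with
      | none => []
      | some q =>
        [List.map (fun x => PySem.List.pyGetD as x "") q,
          List.map (fun x => PySem.List.pyGetD as x "")
            (List.filter (fun x => !q.contains x) (PySem.List.pyRange 0 (n : Int) 1))]) with hF
  set bA : Option Int × List (List String) → List Nat → Option Int × List (List String) :=
    fun x y =>
      match x.1 with
      | none =>
        (some (total_team_time (List.map (fun p => as.getD p "") y) d -
            total_team_time
              (List.filter (fun athlete => !(List.map (fun p => as.getD p "") y).contains athlete) as) d),
          [List.map (fun p => as.getD p "") y,
            List.filter (fun athlete => !(List.map (fun p => as.getD p "") y).contains athlete) as])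
      | some best =>
        if best < total_team_time (List.map (fun p => as.getD p "") y) d -
            total_team_time
              (List.filter (fun athlete => !(List.map (fun p => as.getD p "") y).contains athlete) as) d then
          (some (total_team_time (List.map (fun p => as.getD p "") y) d -
              total_team_time
                (List.filter (fun athlete => !(List.map (fun p => as.getD p "") y).contains athlete) as) d),
            [List.map (fun p => as.getD p "") y,
              List.filter (fun athlete => !(List.map (fun p => as.getD p "") y).contains athlete) as])
        else x with hbA
  set bB : Option Int × Option (List Int) → List Nat → Option Int × Option (List Int) :=
    fun x y =>
      match List.map (fun p : Nat => (p : Int)) y with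
      | [i, j, k, l] =>
        match x.1 with
        | none =>
          (some (PySem.List.pyGetD ts i 0 + PySem.List.pyGetD ts j 0 + PySem.List.pyGetD ts k 0 +
                PySem.List.pyGetD ts l 0 +
                (PySem.List.pyGetD ts i 0 - PySem.List.pyGetD ts j 0) ^ 2 +
                (PySem.List.pyGetD ts j 0 - PySem.List.pyGetD ts k 0) ^ 2 +
                (PySem.List.pyGetD ts k 0 - PySem.List.pyGetD ts l 0) ^ 2 -
              (List.foldl
                  (fun s x =>
                    if s.2.2 < x then
                      (if 0 ≤ s.2.1 then
                          s.1 + PySem.List.pyGetD prefE (x - 1) 0 - PySem.List.pyGetD prefE s.2.2 0 +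
                            (PySem.List.pyGetD ts s.2.1 0 - PySem.List.pyGetD ts s.2.2 0) ^ 2
                        else s.1 + PySem.List.pyGetD prefE (x - 1) 0 - PySem.List.pyGetD prefE s.2.2 0,
                        x - 1, x + 1)
                    else (s.1, s.2.1, x + 1))
                  (ts.sum - PySem.List.pyGetD ts i 0 - PySem.List.pyGetD ts j 0 - PySem.List.pyGetD ts k 0 -
                      PySem.List.pyGetD ts l 0,
                    -1, 0)
                  [i, j, k, l, (n : Int)]).1),
            some (List.map (fun p : Nat => (p : Int)) y))
        | some best =>
          if best < PySem.List.pyGetD ts i 0 + PySem.List.pyGetD ts j 0 + PySem.List.pyGetD ts k 0 +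
                PySem.List.pyGetD ts l 0 +
                (PySem.List.pyGetD ts i 0 - PySem.List.pyGetD ts j 0) ^ 2 +
                (PySem.List.pyGetD ts j 0 - PySem.List.pyGetD ts k 0) ^ 2 +
                (PySem.List.pyGetD ts k 0 - PySem.List.pyGetD ts l 0) ^ 2 -
              (List.foldl
                  (fun s x =>
                    if s.2.2 < x then
                      (if 0 ≤ s.2.1 then
                          s.1 + PySem.List.pyGetD prefE (x - 1) 0 - PySem.List.pyGetD prefE s.2.2 0 +
                            (PySem.List.pyGetD ts s.2.1 0 - PySem.List.pyGetD ts s.2.2 0) ^ 2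
                        else s.1 + PySem.List.pyGetD prefE (x - 1) 0 - PySem.List.pyGetD prefE s.2.2 0,
                        x - 1, x + 1)
                    else (s.1, s.2.1, x + 1))
                  (ts.sum - PySem.List.pyGetD ts i 0 - PySem.List.pyGetD ts j 0 - PySem.List.pyGetD ts k 0 -
                      PySem.List.pyGetD ts l 0,
                    -1, 0)
                  [i, j, k, l, (n : Int)]).1 then
            (some (PySem.List.pyGetD ts i 0 + PySem.List.pyGetD ts j 0 + PySem.List.pyGetD ts k 0 +
                  PySem.List.pyGetD ts l 0 +
                  (PySem.List.pyGetD ts i 0 - PySem.List.pyGetD ts j 0) ^ 2 +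
                  (PySem.List.pyGetD ts j 0 - PySem.List.pyGetD ts k 0) ^ 2 +
                  (PySem.List.pyGetD ts k 0 - PySem.List.pyGetD ts l 0) ^ 2 -
                (List.foldl
                    (fun s x =>
                      if s.2.2 < x then
                        (if 0 ≤ s.2.1 then
                            s.1 + PySem.List.pyGetD prefE (x - 1) 0 - PySem.List.pyGetD prefE s.2.2 0 +
                              (PySem.List.pyGetD ts s.2.1 0 - PySem.List.pyGetD ts s.2.2 0) ^ 2
                          else s.1 + PySem.List.pyGetD prefE (x - 1) 0 - PySem.List.pyGetD prefE s.2.2 0,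
                          x - 1, x + 1)
                      else (s.1, s.2.1, x + 1))
                    (ts.sum - PySem.List.pyGetD ts i 0 - PySem.List.pyGetD ts j 0 - PySem.List.pyGetD ts k 0 -
                        PySem.List.pyGetD ts l 0,
                      -1, 0)
                    [i, j, k, l, (n : Int)]).1),
              some (List.map (fun p : Nat => (p : Int)) y))
          else x
      | _ => x with hbB
  have hP : ∀ c ∈ PySem.List.combinations (List.range n) 4,
      c.Sublist (List.range n) ∧ c.length = 4 := by
    intro c hc
    exact (PySem.List.mem_combinations_iff _ _ _).mp hc
  have hstep : ∀ (s : Option Int × Option (List Int)) (c : List Nat),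
      (c.Sublist (List.range n) ∧ c.length = 4) → bA (F s) c = F (bB s c) := by
    intro s c hc
    obtain ⟨hsub, hlen⟩ := hc
    rcases c with _ | ⟨i, c⟩
    · simp at hlen
    rcases c with _ | ⟨j, c⟩
    · simp at hlen
    rcases c with _ | ⟨k, c⟩
    · simp at hlen
    rcases c with _ | ⟨l, c⟩
    · simp at hlen
    rcases c with _ | ⟨m, c⟩
    swap
    · simp at hlen
    have hmemn : ∀ x ∈ ([i, j, k, l] : List Nat), x < n := fun x hx =>
      List.mem_range.mp (hsub.subset hx)
    have hpw : ([i, j, k, l] : List Nat).Pairwise (· < ·) :=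
      List.Pairwise.sublist hsub List.pairwise_lt_range
    have h4le : 4 ≤ n := by simpa using hsub.length_le
    have hge5 : 5 ≤ n := by omega
    have hmem' : ∀ x ∈ ([i, j, k, l] : List Nat), x < ts.length := by
      intro x hx; rw [hts_len]; exact hmemn x hx
    have hvget : ∀ p : Nat, p < n → PySem.Dict.getD d (as.getD p "") 0 = ts.getD p 0 := by
      intro p hp'
      rw [hts, List.getD_eq_getElem (List.map (fun a => PySem.Dict.getD d a 0) as) 0
          (by rw [List.length_map, ← hn]; exact hp'),
        List.getElem_map, List.getD_eq_getElem as "" (by rw [← hn]; exact hp')]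
    have hpref : ∀ m : Nat, m < ts.length → PySem.List.pyGetD prefE (m : Int) 0 = pvPrefV ts m := by
      intro m hm
      rw [hprefE, show ((n : Int) - 1) = ((ts.length : Int) - 1) by rw [hts_len],
        pvPref_eq ts (by omega), PySem.List.pyGetD_natCast]
      exact PySem.List.getD_map_range _ _ _ _ hm
    have hfold := pvFoldB ts prefE hpref [i, j, k, l] 0
      (ts.sum - PySem.List.pyGetD ts (i : Int) 0 - PySem.List.pyGetD ts (j : Int) 0 -
        PySem.List.pyGetD ts (k : Int) 0 - PySem.List.pyGetD ts (l : Int) 0) (-1)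
      hpw (by simp) hmem' (by omega) (Or.inl rfl)
    simp only [List.cons_append, List.nil_append, List.map_cons, List.map_nil, Nat.cast_zero,
      hts_len, show ¬((0 : Int) ≤ -1) from by norm_num, false_and, if_false, add_zero] at hfold
    have hrem := pvFilterRemove as hnd i j k l hpw (fun x hx => by rw [← hn]; exact hmemn x hx)
    rw [← hn] at hrem
    have hKlen : (pvKept ts 0 [i, j, k, l]).length = n - 4 := by
      have h1 := pvKept_length ts [i, j, k, l] 0 hpw (by simp) hmem' (by omega)
      rw [hts_len] at h1
      simpa using h1
    have hremne : ((pvIkept n 0 [i, j, k, l]).map (fun p => as.getD p "")) ≠ [] := by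
      apply List.ne_nil_of_length_pos
      have h2 : (pvIkept n 0 [i, j, k, l]).length = n - 4 := by
        have h3 := hKlen
        rw [pvKept_eq_map ts, hts_len, List.length_map] at h3
        exact h3
      rw [List.length_map, h2]
      omega
    have hmapval : ((pvIkept n 0 [i, j, k, l]).map (fun p => as.getD p "")).map
        (fun s => PySem.Dict.getD d s 0) = pvKept ts 0 [i, j, k, l] := by
      rw [List.map_map, pvKept_eq_map ts, hts_len]
      apply List.map_congr_left
      intro p hp'
      have hpn : p < n := pvIkept_mem_lt n [i, j, k, l] 0 p hmemn hp'
      simp only [Function.comp_apply, pvTs]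
      exact hvget p hpn
    have ht1A : total_team_time [as.getD i "", as.getD j "", as.getD k "", as.getD l ""] d
        = ts.getD i 0 + ts.getD j 0 + ts.getD k 0 + ts.getD l 0 + (ts.getD i 0 - ts.getD j 0) ^ 2
          + (ts.getD j 0 - ts.getD k 0) ^ 2 + (ts.getD k 0 - ts.getD l 0) ^ 2 := by
      rw [pvTotal_eq _ d (by simp)]
      simp only [List.map_cons, List.map_nil, pvChainE_cons₂, pvChainE_singleton, List.sum_cons,
        List.sum_nil]
      rw [hvget i (hmemn i (by simp)), hvget j (hmemn j (by simp)), hvget k (hmemn k (by simp)),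
        hvget l (hmemn l (by simp))]
      ring
    have ht2A : total_team_time ((pvIkept n 0 [i, j, k, l]).map (fun p => as.getD p "")) d
        = (pvKept ts 0 [i, j, k, l]).sum + pvChainE (pvKept ts 0 [i, j, k, l]) := by
      rw [pvTotal_eq _ d hremne, hmapval]
    have hsum' : (pvKept ts 0 [i, j, k, l]).sum
        = ts.sum - ts.getD i 0 - ts.getD j 0 - ts.getD k 0 - ts.getD l 0 := by
      have h1 := pvKept_sum ts [i, j, k, l] 0 hpw (by simp) hmem' (by omega)
      rw [← pvSum_eq ts, show pvS ts 0 = 0 from rfl] at h1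
      simp only [List.map_cons, List.map_nil, List.sum_cons, List.sum_nil, pvTs] at h1
      linarith
    have hteam : List.map (fun x => PySem.List.pyGetD as x "") ([(i : Int), j, k, l])
        = [as.getD i "", as.getD j "", as.getD k "", as.getD l ""] := by
      simp [PySem.List.pyGetD_natCast]
    have hrest : List.map (fun x => PySem.List.pyGetD as x "")
        (List.filter (fun x => !(([(i : Int), j, k, l] : List Int).contains x))
          (PySem.List.pyRange 0 (n : Int) 1))
        = (pvIkept n 0 [i, j, k, l]).map (fun p => as.getD p "") := by
      rw [hpyr, List.filter_map, List.map_map]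
      have hfc : List.filter ((fun x => !(([(i : Int), j, k, l] : List Int).contains x))
            ∘ (fun p : Nat => (p : Int))) (List.range n)
          = List.filter (fun y => !(([i, j, k, l] : List Nat).contains y)) (List.range n) :=
        List.filter_congr (fun y hy => by
          simp [Function.comp, List.contains_eq_mem, Nat.cast_inj])
      rw [hfc]
      have hcomp : ((fun x => PySem.List.pyGetD as x "") ∘ (fun p : Nat => (p : Int)))
          = fun p => as.getD p "" := funext fun p => PySem.List.pyGetD_natCast as p ""
      rw [hcomp]
      have hr := pvRangeFilter n [i, j, k, l] 0 hpw (by simp) hmemn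
      simp only [Nat.sub_zero] at hr
      rw [← List.range_eq_range'] at hr
      rw [hr]
    simp only [hbA, hbB, hF, List.map_cons, List.map_nil]
    cases hs1 : s.1 with
    | none =>
      simp only []
      rw [hrem, ht1A, ht2A, hfold, hteam, hrest]
      simp only [PySem.List.pyGetD_natCast]
      rw [hsum']
    | some best =>
      simp only []
      rw [hrem, ht1A, ht2A, hfold]
      simp only [PySem.List.pyGetD_natCast]
      rw [hsum']
      by_cases hbs : best < ts.getD i 0 + ts.getD j 0 + ts.getD k 0 + ts.getD l 0
          + (ts.getD i 0 - ts.getD j 0) ^ 2 + (ts.getD j 0 - ts.getD k 0) ^ 2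
          + (ts.getD k 0 - ts.getD l 0) ^ 2
          - (ts.sum - ts.getD i 0 - ts.getD j 0 - ts.getD k 0 - ts.getD l 0
            + pvChainE (pvKept ts 0 [i, j, k, l]))
      · simp only [if_pos hbs]
        rw [hteam, hrest]
      · simp only [if_neg hbs]
        rw [hs1]
  have hmain := pvFoldRel F bA bB (fun c => c.Sublist (List.range n) ∧ c.length = 4)
    (PySem.List.combinations (List.range n) 4) (none, []) (none, none) hP hstep rfl
  rw [hmain, hF]
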